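-- pv_equiv track=rewrite | github.com/vinodkrishnan175-lan/Geda3.Ai-Web-POC | tat_engine.py | _positional_reg_fix
-- ===== SOURCE A (Python) =====
-- ALPHA_POS = {0, 1, 4, 5}
--
-- NUM_POS = {2, 3, 6, 7, 8, 9}
--
-- OCR_ALPHA_TO_NUM = {"O": "0", "Q": "0", "D": "0", "I": "1", "L": "1", "S": "5", "B": "8", "Z": "2"}
--
-- OCR_NUM_TO_ALPHA = {"0": "O", "1": "I", "5": "S", "8": "B", "2": "Z"}
--
-- def _positional_reg_fix(s: str) -> str:
--     if not isinstance(s, str):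
--         return ""
--     # Only apply positional OCR correction when we truly have a 10-character candidate.
--     # For shorter malformed registrations, preserve the cleaned text rather than forcing letters/numbers.
--     if len(s) != 10:
--         return s
--     chars = list(s)
--     for idx, ch in enumerate(chars):
--         if idx in ALPHA_POS:
--             if ch.isdigit():
--                 chars[idx] = OCR_NUM_TO_ALPHA.get(ch, ch)
--         elif idx in NUM_POS:
--             if ch.isalpha():
--                 chars[idx] = OCR_ALPHA_TO_NUM.get(ch, ch)
--     return "".join(chars)
-- ===== SOURCE B (Python) =====
-- # Slice-and-translate: split the 10-char string into its alpha/num segments and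
-- # fix each whole segment with str.translate tables (no per-index dispatch loop).
-- _TO_ALPHA = str.maketrans("01582", "OISBZ")
-- _TO_NUM = str.maketrans("OQDILSBZ", "00011582")
--
-- def _positional_reg_fix(s: str) -> str:
--     if not isinstance(s, str):
--         return ""
--     if len(s) != 10:
--         return s
--     return (s[0:2].translate(_TO_ALPHA)
--             + s[2:4].translate(_TO_NUM)
--             + s[4:6].translate(_TO_ALPHA)
--             + s[6:10].translate(_TO_NUM))
-- ===== Notes on version B (the rewrite author's own statement) =====
-- stated objective: alternative
-- what changed: Replaced the per-index loop with set-membership and isdigit/isalpha branching by slicing the string into its four alpha/num segments and correcting each whole segment with a str.translate table (the class guards are redundant since each table only maps that character class).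
import Mathlib
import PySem

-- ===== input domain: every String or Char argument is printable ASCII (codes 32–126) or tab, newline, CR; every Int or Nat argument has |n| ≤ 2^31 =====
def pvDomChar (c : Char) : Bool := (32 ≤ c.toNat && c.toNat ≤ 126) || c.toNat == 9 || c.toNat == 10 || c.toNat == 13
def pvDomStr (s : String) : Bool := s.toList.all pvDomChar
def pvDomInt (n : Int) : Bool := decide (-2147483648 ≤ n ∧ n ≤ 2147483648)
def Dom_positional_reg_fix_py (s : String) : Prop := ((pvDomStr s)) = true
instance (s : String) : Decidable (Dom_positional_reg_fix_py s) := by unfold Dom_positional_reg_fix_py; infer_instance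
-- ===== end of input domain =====

-- B slices the 10-char string into its four alpha/num segments and corrects each whole
-- segment with a translate table, instead of A's per-index loop with set membership
-- and isdigit/isalpha branching (objective: alternative).

-- ===== PORT A =====
-- shared module constants (both Pythons encode the same two OCR correspondences)
def ocrAlphaToNum : PySem.Dict Char Char :=
  PySem.Dict.ofList [('O','0'),('Q','0'),('D','0'),('I','1'),('L','1'),('S','5'),('B','8'),('Z','2')]
def ocrNumToAlpha : PySem.Dict Char Char :=
  PySem.Dict.ofList [('0','O'),('1','I'),('5','S'),('8','B'),('2','Z')]
-- A-side helpers: ALPHA_POS / NUM_POS sets, and the body of A's enumerate loop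
def alphaPos : PySem.Set Int := PySem.Set.ofList [0, 1, 4, 5]
def numPos : PySem.Set Int := PySem.Set.ofList [2, 3, 6, 7, 8, 9]
def aStep (acc : List Char) (p : Int × Char) : List Char :=
  if PySem.Set.contains alphaPos p.1 then
    if PySem.Chars.isdigit p.2 then PySem.List.pySetD acc p.1 (ocrNumToAlpha.getD p.2 p.2) else acc
  else if PySem.Set.contains numPos p.1 then
    if PySem.Chars.isalpha p.2 then PySem.List.pySetD acc p.1 (ocrAlphaToNum.getD p.2 p.2) else acc
  else acc
-- the isinstance guard cannot fire under the type convention (s is always a str)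
def positional_reg_fix_py (s : String) : String :=
  if PySem.Str.len s ≠ 10 then s
  else
    let chars := s.toList
    String.mk ((PySem.List.enumerate chars 0).foldl aStep chars)

-- ===== PORT B =====
-- Source B's str.translate(table) is exact as a map with dict lookup defaulting to the
-- character itself (the maketrans tables key single ASCII chars only)
def trAlpha (cs : List Char) : List Char := cs.map (fun c => ocrNumToAlpha.getD c c)
def trNum (cs : List Char) : List Char := cs.map (fun c => ocrAlphaToNum.getD c c)
def positional_reg_fix_py_alt (s : String) : String :=
  if PySem.Str.len s ≠ 10 then s
  else
    let l := s.toList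
    String.mk (trAlpha (PySem.List.slice l (some 0) (some 2))
      ++ trNum (PySem.List.slice l (some 2) (some 4))
      ++ trAlpha (PySem.List.slice l (some 4) (some 6))
      ++ trNum (PySem.List.slice l (some 6) (some 10)))

-- ===== PRECONDITION & SPEC =====
def Spec_positional_reg_fix_py (s : String) (out : String) : Prop := out = positional_reg_fix_py_alt s
instance (s : String) (out : String) : Decidable (Spec_positional_reg_fix_py s out) := by unfold Spec_positional_reg_fix_py; infer_instance

-- ===== CLAIM (what is proved, stated in full; the proofs are below) =====
def Claim_equal_positional_reg_fix_py : Prop := ∀ (s : String), Dom_positional_reg_fix_py s → Spec_positional_reg_fix_py s (positional_reg_fix_py s)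

-- ===== LEMMAS AND PROOFS =====

-- per-character value written by A at index i (just aStep's branch structure, without the list update)
def gA (i : Int) (c : Char) : Char :=
  if PySem.Set.contains alphaPos i then
    (if PySem.Chars.isdigit c then ocrNumToAlpha.getD c c else c)
  else if PySem.Set.contains numPos i then
    (if PySem.Chars.isalpha c then ocrAlphaToNum.getD c c else c)
  else c

def mapFrom : Nat → List Char → List Char
  | _, [] => []
  | k, c :: cs => gA k c :: mapFrom (k + 1) cs

lemma getD_numToAlpha_miss (c : Char) (h : PySem.Chars.isdigit c = false) :
    ocrNumToAlpha.getD c c = c := by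
  have e0 : ('0' == c) = false := beq_eq_false_iff_ne.mpr (fun e => by rw [← e] at h; exact absurd h (by decide))
  have e1 : ('1' == c) = false := beq_eq_false_iff_ne.mpr (fun e => by rw [← e] at h; exact absurd h (by decide))
  have e2 : ('5' == c) = false := beq_eq_false_iff_ne.mpr (fun e => by rw [← e] at h; exact absurd h (by decide))
  have e3 : ('8' == c) = false := beq_eq_false_iff_ne.mpr (fun e => by rw [← e] at h; exact absurd h (by decide))
  have e4 : ('2' == c) = false := beq_eq_false_iff_ne.mpr (fun e => by rw [← e] at h; exact absurd h (by decide))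
  simp [ocrNumToAlpha, PySem.Dict.getD, PySem.Dict.get?, PySem.Dict.ofList, PySem.Dict.update,
        PySem.Dict.insert, PySem.Dict.empty, List.find?, e0, e1, e2, e3, e4]

lemma getD_alphaToNum_miss (c : Char) (h : PySem.Chars.isalpha c = false) :
    ocrAlphaToNum.getD c c = c := by
  have e0 : ('O' == c) = false := beq_eq_false_iff_ne.mpr (fun e => by rw [← e] at h; exact absurd h (by decide))
  have e1 : ('Q' == c) = false := beq_eq_false_iff_ne.mpr (fun e => by rw [← e] at h; exact absurd h (by decide))
  have e2 : ('D' == c) = false := beq_eq_false_iff_ne.mpr (fun e => by rw [← e] at h; exact absurd h (by decide))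
  have e3 : ('I' == c) = false := beq_eq_false_iff_ne.mpr (fun e => by rw [← e] at h; exact absurd h (by decide))
  have e4 : ('L' == c) = false := beq_eq_false_iff_ne.mpr (fun e => by rw [← e] at h; exact absurd h (by decide))
  have e5 : ('S' == c) = false := beq_eq_false_iff_ne.mpr (fun e => by rw [← e] at h; exact absurd h (by decide))
  have e6 : ('B' == c) = false := beq_eq_false_iff_ne.mpr (fun e => by rw [← e] at h; exact absurd h (by decide))
  have e7 : ('Z' == c) = false := beq_eq_false_iff_ne.mpr (fun e => by rw [← e] at h; exact absurd h (by decide))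
  simp [ocrAlphaToNum, PySem.Dict.getD, PySem.Dict.get?, PySem.Dict.ofList, PySem.Dict.update,
        PySem.Dict.insert, PySem.Dict.empty, List.find?, e0, e1, e2, e3, e4, e5, e6, e7]

-- A's class guards collapse: the dicts only key on that character class
lemma guard_num (c : Char) :
    (if PySem.Chars.isdigit c then ocrNumToAlpha.getD c c else c) = ocrNumToAlpha.getD c c := by
  by_cases h : PySem.Chars.isdigit c
  · simp [h]
  · simp [h, getD_numToAlpha_miss c (by simpa using h)]

lemma guard_alpha (c : Char) :
    (if PySem.Chars.isalpha c then ocrAlphaToNum.getD c c else c) = ocrAlphaToNum.getD c c := by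
  by_cases h : PySem.Chars.isalpha c
  · simp [h]
  · simp [h, getD_alphaToNum_miss c (by simpa using h)]

lemma set_append_cons (pre : List Char) (c v : Char) (cs : List Char) :
    (pre ++ c :: cs).set pre.length v = pre ++ v :: cs := by
  induction pre with
  | nil => simp
  | cons a pre ih => simp [ih]

lemma aStep_append (pre : List Char) (c : Char) (cs : List Char) :
    aStep (pre ++ c :: cs) ((pre.length : Int), c) = pre ++ gA pre.length c :: cs := by
  unfold aStep gA
  split_ifs with h1 h2 h3 h4 <;>
    simp [PySem.List.pySetD_natCast, set_append_cons pre c _ cs]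

lemma fold_aStep_spec (l : List Char) : ∀ (pre : List Char),
    (PySem.List.enumerate l (pre.length : Int)).foldl aStep (pre ++ l)
      = pre ++ mapFrom pre.length l := by
  induction l with
  | nil => intro pre; simp [PySem.List.enumerate_nil, mapFrom]
  | cons c cs ih =>
    intro pre
    rw [PySem.List.enumerate_cons, List.foldl_cons, aStep_append, mapFrom]
    have hlen : ((pre.length : Int) + 1) = ((pre ++ [gA pre.length c]).length : Int) := by
      simp
    have := ih (pre ++ [gA pre.length c])
    simp only [List.append_assoc, List.singleton_append, List.length_append,
      List.length_singleton] at this ⊢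
    rw [hlen]
    simpa using this

lemma mapFrom_eq_segments (l : List Char) (h : l.length = 10) :
    mapFrom 0 l = trAlpha (PySem.List.slice l (some 0) (some 2))
      ++ trNum (PySem.List.slice l (some 2) (some 4))
      ++ trAlpha (PySem.List.slice l (some 4) (some 6))
      ++ trNum (PySem.List.slice l (some 6) (some 10)) := by
  match l, h with
  | [c0, c1, c2, c3, c4, c5, c6, c7, c8, c9], _ =>
    simp [mapFrom, gA, trAlpha, trNum, PySem.List.slice, PySem.List.clampIdx,
      alphaPos, numPos, PySem.Set.contains, PySem.Set.ofList, PySem.Set.add,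
      guard_num, guard_alpha]

-- ===== VERDICT (by name: the statement is the Claim_ definition above) =====
theorem positional_reg_fix_py_spec : Claim_equal_positional_reg_fix_py := by
  intro s _
  unfold Spec_positional_reg_fix_py positional_reg_fix_py positional_reg_fix_py_alt
  by_cases hl : PySem.Str.len s = 10
  · have hl' : ¬ (PySem.Str.len s ≠ 10) := by rw [hl]; simp
    have hlen : s.toList.length = 10 := by
      have h := hl; simp [PySem.Str.len] at h; exact_mod_cast h
    have h0 : (PySem.List.enumerate s.toList (0 : Int)).foldl aStep s.toList
        = mapFrom 0 s.toList := by
      simpa using fold_aStep_spec s.toList []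
    rw [if_neg hl', if_neg hl']
    show String.mk ((PySem.List.enumerate s.toList (0 : Int)).foldl aStep s.toList) = _
    rw [h0, mapFrom_eq_segments s.toList hlen]
  · rw [if_pos hl, if_pos hl]
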